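-- pv_equiv track=rewrite | github.com/Kritika1129/Python | Python Code/Print Prime, Perfect, Armstrong Numbers Just Smaller Than the Given Input.py | find_special_numbers
-- ===== SOURCE A (Python) =====
-- import math
--
-- def is_prime(n):
--     if n <= 1:
--         return False
--     for i in range(2, int(math.sqrt(n)) + 1):
--         if n % i == 0:
--             return False
--     return True
--
-- def is_perfect(n):
--     if n <= 1:
--         return False
--     sum_divisors = sum(i for i in range(1, n) if n % i == 0)
--     return sum_divisors == n
--
-- def is_armstrong(n):
--     num_str = str(n)
--     power = len(num_str)
--     return n == sum(int(digit) ** power for digit in num_str)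
--
-- def find_special_numbers(limit):
--     prime = perfect = armstrong = None
--     for i in range(limit - 1, 0, -1):
--         if not prime and is_prime(i):
--             prime = i
--         if not perfect and is_perfect(i):
--             perfect = i
--         if not armstrong and is_armstrong(i):
--             armstrong = i
--         if prime and perfect and armstrong:
--             break
--     return prime, perfect, armstrong
-- ===== SOURCE B (Python) =====
-- def _is_prime(n):
--     if n <= 1:
--         return False
--     d = 2
--     while d * d <= n:
--         if n % d == 0:
--             return False
--         d += 1
--     return True
--
--
-- def _is_perfect(n):
--     if n <= 1:
--         return False
--     # sum proper divisors by pairing d with n // d, scanning only up to sqrt(n)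
--     s = 1
--     d = 2
--     while d * d <= n:
--         if n % d == 0:
--             s += d
--             q = n // d
--             if q != d:
--                 s += q
--         d += 1
--     return s == n
--
--
-- def _is_armstrong(n):
--     num_str = str(n)
--     power = len(num_str)
--     return n == sum(int(digit) ** power for digit in num_str)
--
--
-- def _largest_below(limit, pred):
--     i = limit - 1
--     while i >= 1:
--         if pred(i):
--             return i
--         i -= 1
--     return None
--
--
-- def find_special_numbers(limit):
--     return (_largest_below(limit, _is_prime),
--             _largest_below(limit, _is_perfect),
--             _largest_below(limit, _is_armstrong))
-- ===== Notes on version B (the rewrite author's own statement) =====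
-- stated objective: faster
-- what changed: B replaces A's single countdown loop with three-flag state and O(n) trial-sum perfect test by three independent first-match downward searches, with the perfect test summing divisors in pairs (d, n//d) only up to sqrt(n).
import Mathlib
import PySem

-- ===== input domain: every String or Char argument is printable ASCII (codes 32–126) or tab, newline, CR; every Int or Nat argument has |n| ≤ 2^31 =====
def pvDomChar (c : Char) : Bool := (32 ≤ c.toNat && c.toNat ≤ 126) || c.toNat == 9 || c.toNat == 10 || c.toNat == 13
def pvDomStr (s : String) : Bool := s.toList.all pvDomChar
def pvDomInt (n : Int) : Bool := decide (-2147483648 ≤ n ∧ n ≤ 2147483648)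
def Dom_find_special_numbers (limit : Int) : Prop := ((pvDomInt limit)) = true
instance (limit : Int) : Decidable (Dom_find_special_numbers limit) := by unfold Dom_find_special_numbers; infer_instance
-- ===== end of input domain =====

-- B replaces A's single three-flag countdown loop and O(n) divisor-sum perfect test by three
-- independent first-match downward searches with a paired-divisor (up to sqrt) perfect test; the
-- timing run measured B faster. The Python tuple result is rendered as a 3-element list here.

-- ===== PORT A =====

-- is_prime: `int(math.sqrt(n))` is ported as Int.sqrt n, exact for the 0 ≤ n ≤ 2^31 integers A
-- feeds it (float sqrt is correctly rounded there); the loop with early `return False` is `.all`.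
def isPrimeA (n : Int) : Bool :=
  if n ≤ 1 then false
  else (PySem.List.pyRange 2 (Int.sqrt n + 1) 1).all (fun i => !(PySem.Int.mod n i == 0))

-- is_perfect: sum of i over range(1, n) with n % i == 0, compared to n
def isPerfectA (n : Int) : Bool :=
  if n ≤ 1 then false
  else ((PySem.List.pyRange 1 n 1).foldl
          (fun s i => if PySem.Int.mod n i == 0 then s + i else s) 0) == n

-- int(digit) for a single char of str(i): inside A it is only applied to chars of str(i) with
-- i ≥ 1, all of which are '0'..'9', where int(c) = c - '0' exactly.
def digitIntA (c : Char) : Int := (c.toNat : Int) - 48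

-- is_armstrong: digits of str(n), each raised to len(str(n))
def isArmstrongA (n : Int) : Bool :=
  let numStr := PySem.Int.toChars n
  let power := numStr.length
  n == numStr.foldl (fun s digit => s + digitIntA digit ^ power) 0

-- the `for i in range(limit-1, 0, -1)` loop with the three None/value flags and the break;
-- fuel = number of remaining iterations; `not prime` = .isNone and `if prime and ...` = .isSome
-- because every value ever stored is some i with i ≥ 1 (never 0, so truthiness = is-not-None).
def loopA : Nat → Int → Option Int → Option Int → Option Int → Option Int × Option Int × Option Int
  | 0, _, p, f, a => (p, f, a)
  | fuel+1, i, p, f, a =>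
    let p := if p.isNone && isPrimeA i then some i else p
    let f := if f.isNone && isPerfectA i then some i else f
    let a := if a.isNone && isArmstrongA i then some i else a
    if p.isSome && f.isSome && a.isSome then (p, f, a)
    else loopA fuel (i - 1) p f a

def find_special_numbers (limit : Int) : List (Option Int) :=
  let r := loopA (limit - 1).toNat (limit - 1) none none none
  [r.1, r.2.1, r.2.2]

-- ===== PORT B =====

-- _is_prime: while d * d <= n trial division (fuel bounds the while loop; n.toNat iterations
-- always suffice since d only grows and starts at 2)
def primeLoopB (n : Int) : Nat → Int → Bool
  | 0, _ => true
  | fuel+1, d =>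
    if d * d ≤ n then
      if PySem.Int.mod n d == 0 then false else primeLoopB n fuel (d + 1)
    else true

def isPrimeB (n : Int) : Bool :=
  if n ≤ 1 then false else primeLoopB n n.toNat 2

-- _is_perfect: paired divisor sum, d and q = n // d for d * d <= n, starting from s = 1
def perfLoopB (n : Int) : Nat → Int → Int → Int
  | 0, _, s => s
  | fuel+1, d, s =>
    if d * d ≤ n then
      let s := if PySem.Int.mod n d == 0 then
                 let s := s + d
                 let q := PySem.Int.floordiv n d
                 if q != d then s + q else s
               else s
      perfLoopB n fuel (d + 1) s
    else s

def isPerfectB (n : Int) : Bool :=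
  if n ≤ 1 then false else perfLoopB n n.toNat 2 1 == n

-- _is_armstrong: same string-based digit-power sum as A's helper
def isArmstrongB (n : Int) : Bool :=
  let numStr := PySem.Int.toChars n
  let power := numStr.length
  n == numStr.foldl (fun s digit => s + digitIntA digit ^ power) 0

-- _largest_below: while i >= 1 downward scan, first match wins (fuel = i.toNat iterations)
def searchB (pred : Int → Bool) : Nat → Int → Option Int
  | 0, _ => none
  | fuel+1, i =>
    if 1 ≤ i then (if pred i then some i else searchB pred fuel (i - 1)) else none

def find_special_numbers_alt (limit : Int) : List (Option Int) :=
  [searchB isPrimeB (limit - 1).toNat (limit - 1),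
   searchB isPerfectB (limit - 1).toNat (limit - 1),
   searchB isArmstrongB (limit - 1).toNat (limit - 1)]

-- ===== PRECONDITION & SPEC =====
def Spec_find_special_numbers (limit : Int) (out : List (Option Int)) : Prop := out = find_special_numbers_alt limit
instance (limit : Int) (out : List (Option Int)) : Decidable (Spec_find_special_numbers limit out) := by unfold Spec_find_special_numbers; infer_instance

-- ===== CLAIM (what is proved, stated in full; the proofs are below) =====
def Claim_equal_find_special_numbers : Prop := ∀ (limit : Int), Dom_find_special_numbers limit → Spec_find_special_numbers limit (find_special_numbers limit)

-- ===== LEMMAS AND PROOFS =====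

-- searchB only looks at the predicate on arguments ≥ 1
lemma searchB_congr (p q : Int → Bool) (h : ∀ j, 1 ≤ j → p j = q j) :
    ∀ (fuel : Nat) (i : Int), searchB p fuel i = searchB q fuel i := by
  intro fuel
  induction fuel with
  | zero => intro i; rfl
  | succ k ih =>
    intro i
    simp only [searchB]
    split
    · next hi => rw [h i hi, ih]
    · rfl

-- ---- arithmetic bridges ----

lemma sq_le_iff_le_sqrt {n d : Int} (hn : 0 ≤ n) (hd : 0 < d) :
    d * d ≤ n ↔ d ≤ Int.sqrt n := by
  have h1 : Int.sqrt n = ((Nat.sqrt n.toNat : Nat) : Int) := rfl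
  rw [h1]
  have hd' : d = (d.toNat : Int) := by omega
  rw [hd', ← Nat.cast_mul]
  constructor
  · intro h
    have : d.toNat * d.toNat ≤ n.toNat := by omega
    exact_mod_cast Nat.le_sqrt.mpr this
  · intro h
    have : d.toNat ≤ Nat.sqrt n.toNat := by exact_mod_cast h
    have := Nat.le_sqrt.mp this
    omega

lemma sum_map_range (N : Nat) (f : Nat → Int) :
    ((List.range N).map f).sum = ∑ k ∈ Finset.range N, f k := rfl

lemma mod_beq_zero_eq_dvd (n : Int) (i : Nat) (hn : 0 ≤ n) :
    (PySem.Int.mod n (i : Int) == 0) = decide (i ∣ n.toNat) := by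
  have hn' : n = ((n.toNat : Nat) : Int) := by omega
  rw [Bool.eq_iff_iff]
  simp only [beq_iff_eq, decide_eq_true_eq, PySem.Int.mod_eq_zero_iff_dvd]
  rw [hn', Int.natCast_dvd_natCast, Int.toNat_natCast]

-- ---- prime helpers agree ----

lemma primeLoopB_eq_all (n : Int) (hn : 2 ≤ n) :
    ∀ (fuel : Nat) (d : Int), 0 < d → (Int.sqrt n + 1 - d).toNat ≤ fuel →
      primeLoopB n fuel d
        = (PySem.List.pyRange d (Int.sqrt n + 1) 1).all (fun i => !(PySem.Int.mod n i == 0)) := by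
  intro fuel
  induction fuel with
  | zero =>
    intro d hd hfuel
    have : Int.sqrt n + 1 ≤ d := by omega
    rw [PySem.List.pyRange_one_eq_nil this]
    rfl
  | succ k ih =>
    intro d hd hfuel
    by_cases hsq : d * d ≤ n
    · have hlt : d ≤ Int.sqrt n := (sq_le_iff_le_sqrt (by omega) hd).mp hsq
      rw [PySem.List.pyRange_one_cons (by omega)]
      simp only [primeLoopB, if_pos hsq, List.all_cons]
      by_cases hm : PySem.Int.mod n d == 0
      · simp [hm]
      · rw [if_neg hm, ih (d+1) (by omega) (by omega)]
        simp [hm]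
    · have : Int.sqrt n < d := by
        by_contra hle
        exact hsq ((sq_le_iff_le_sqrt (by omega) hd).mpr (by omega))
      rw [PySem.List.pyRange_one_eq_nil (by omega)]
      simp [primeLoopB, hsq]

lemma isPrime_agree : ∀ j : Int, 1 ≤ j → isPrimeA j = isPrimeB j := by
  intro j hj
  unfold isPrimeA isPrimeB
  by_cases h : j ≤ 1
  · simp [h]
  · rw [if_neg h, if_neg h]
    rw [primeLoopB_eq_all j (by omega) j.toNat 2 (by omega)]
    have := Nat.sqrt_le_self j.toNat
    have h1 : Int.sqrt j = ((Nat.sqrt j.toNat : Nat) : Int) := rfl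
    omega

-- ---- perfect helpers agree ----

lemma properDivisors_eq_filter_Ico (m : Nat) (hm : 2 ≤ m) :
    m.properDivisors = Finset.filter (· ∣ m) (Finset.Ico 1 m) := by
  ext x
  simp only [Nat.mem_properDivisors, Finset.mem_filter, Finset.mem_Ico]
  constructor
  · intro ⟨hdvd, hlt⟩
    refine ⟨⟨?_, hlt⟩, hdvd⟩
    rcases Nat.eq_zero_or_pos x with h | h
    · subst h; simp at hdvd; omega
    · omega
  · intro ⟨⟨_, hlt⟩, hdvd⟩; exact ⟨hdvd, hlt⟩

-- A's divisor sum over range(1, n) is the proper-divisor sum of n.toNat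
lemma sumA_eq (n : Int) (hn : 2 ≤ n) :
    (PySem.List.pyRange 1 n 1).foldl (fun s i => if PySem.Int.mod n i == 0 then s + i else s) 0
      = ((∑ i ∈ (n.toNat).properDivisors, i : ℕ) : ℤ) := by
  rw [PySem.List.pyRange_one, List.foldl_map, show (fun (s : Int) (k : Nat) => if PySem.Int.mod n (1 + (k:Int)) == 0 then s + (1 + (k:Int)) else s) = (fun (s : Int) (k : Nat) => s + (if PySem.Int.mod n (1 + (k:Int)) == 0 then (1 + (k:Int)) else 0)) from by funext s k; split <;> simp,
     PySem.List.foldl_add, sum_map_range, zero_add]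
  have hre : ∑ k ∈ Finset.range (n - 1).toNat, (if PySem.Int.mod n (1 + (k:Int)) == 0 then (1 + (k:Int)) else 0)
      = ∑ i ∈ Finset.Ico 1 n.toNat, (if PySem.Int.mod n (i:Int) == 0 then ((i:Nat):Int) else 0) := by
    rw [Finset.sum_Ico_eq_sum_range]
    have : n.toNat - 1 = (n - 1).toNat := by omega
    rw [this]
    apply Finset.sum_congr rfl
    intro k _
    push_cast
    rfl
  rw [hre]
  rw [properDivisors_eq_filter_Ico n.toNat (by omega), Finset.sum_filter]
  push_cast
  apply Finset.sum_congr rfl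
  intro i hi
  simp only [Finset.mem_Ico] at hi
  rw [mod_beq_zero_eq_dvd n i (by omega)]
  by_cases h : i ∣ n.toNat <;> simp [h]

lemma div_self_ne_iff {m e : Nat} (he : e ∣ m) (h1 : 1 ≤ e) :
    (m / e ≠ e) ↔ e * e ≠ m := by
  have hq : e * (m / e) = m := Nat.mul_div_cancel' he
  constructor
  · intro h hcontra
    apply h
    rw [← hcontra] at hq ⊢
    exact Nat.eq_of_mul_eq_mul_left (by omega) hq
  · intro h hcontra
    rw [hcontra] at hq
    exact h hq

lemma paired_divisor_sum (m : Nat) (hm : 2 ≤ m) :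
    1 + ∑ e ∈ Finset.Ico 2 (Nat.sqrt m + 1),
          (if e ∣ m then e + (if m / e ≠ e then m / e else 0) else 0)
      = ∑ i ∈ m.properDivisors, i := by
  set f : Nat → Nat := fun e => e + if m / e ≠ e then m / e else 0 with hf
  set D := m.divisors with hD
  set small := D.filter (fun e => e * e ≤ m) with hsmall
  set strict := D.filter (fun e => e * e < m) with hstrict
  set big := D.filter (fun e => m < e * e) with hbig
  have hmem : ∀ e, e ∈ D ↔ e ∣ m ∧ m ≠ 0 := fun e => Nat.mem_divisors
  -- Step A: the Ico sum is the sum of f over divisors e with 2 ≤ e and e*e ≤ m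
  have stepA : ∑ e ∈ Finset.Ico 2 (Nat.sqrt m + 1),
      (if e ∣ m then f e else 0) = ∑ e ∈ small.filter (fun e => 2 ≤ e), f e := by
    rw [← Finset.sum_filter]
    apply Finset.sum_congr _ (fun _ _ => rfl)
    ext e
    simp only [Finset.mem_filter, Finset.mem_Ico, hsmall, hD, Nat.mem_divisors]
    constructor
    · intro ⟨⟨h2, hlt⟩, hdvd⟩
      exact ⟨⟨⟨hdvd, by omega⟩, Nat.le_sqrt.mp (by omega)⟩, h2⟩
    · intro ⟨⟨⟨hdvd, _⟩, hsq⟩, h2⟩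
      exact ⟨⟨h2, by have := Nat.le_sqrt.mpr hsq; omega⟩, hdvd⟩
  -- Step B: splitting off e = 1 from small
  have hone : small.filter (fun e => ¬ 2 ≤ e) = {1} := by
    ext e
    simp only [Finset.mem_filter, Finset.mem_singleton, hsmall, hD, Nat.mem_divisors]
    constructor
    · intro ⟨⟨⟨hdvd, _⟩, _⟩, h2⟩
      have : e ≠ 0 := by rintro rfl; simp at hdvd; omega
      omega
    · rintro rfl
      exact ⟨⟨⟨one_dvd m, by omega⟩, by omega⟩, by omega⟩
  have hf1 : f 1 = 1 + m := by
    simp only [hf, Nat.div_one]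
    rw [if_pos (by omega)]
  have stepB : ∑ e ∈ small, f e = (1 + m) + ∑ e ∈ small.filter (fun e => 2 ≤ e), f e := by
    rw [← Finset.sum_filter_add_sum_filter_not small (fun e => 2 ≤ e) f, hone]
    rw [Finset.sum_singleton, hf1]
    omega
  -- Step C: rewrite the second part of f via the strict condition
  have stepC : ∑ e ∈ small, f e = ∑ e ∈ small, e + ∑ e ∈ strict, (m / e) := by
    have : ∑ e ∈ small, f e = ∑ e ∈ small, (e + if e * e < m then m / e else 0) := by
      apply Finset.sum_congr rfl
      intro e he
      simp only [hsmall, Finset.mem_filter, hD, Nat.mem_divisors] at he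
      obtain ⟨⟨hdvd, hm0⟩, hsq⟩ := he
      have h1 : 1 ≤ e := by
        rcases Nat.eq_zero_or_pos e with h | h
        · subst h; simp at hdvd; omega
        · omega
      simp only [hf]
      congr 1
      have hiff := div_self_ne_iff hdvd h1
      by_cases h : m / e ≠ e
      · rw [if_pos h, if_pos (by have := hiff.mp h; omega)]
      · rw [if_neg h, if_neg (by intro hlt; exact h (hiff.mpr (by omega)))]
    rw [this, Finset.sum_add_distrib]
    congr 1
    rw [← Finset.sum_filter]
    apply Finset.sum_congr _ (fun _ _ => rfl)
    simp only [hstrict, hsmall, Finset.filter_filter]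
    apply Finset.filter_congr
    intro e _
    constructor
    · intro h; exact h.2
    · intro h; exact ⟨Nat.le_of_lt h, h⟩
  -- Step D: the bijection d ↦ m / d between strict and big
  have stepD : ∑ e ∈ strict, (m / e) = ∑ e ∈ big, e := by
    apply Finset.sum_nbij' (fun d => m / d) (fun d => m / d)
    · intro d hd
      simp only [hstrict, Finset.mem_filter, hD, Nat.mem_divisors] at hd
      obtain ⟨⟨hdvd, hm0⟩, hsq⟩ := hd
      have hq : d * (m / d) = m := Nat.mul_div_cancel' hdvd
      have hd1 : 1 ≤ d := by
        rcases Nat.eq_zero_or_pos d with h | h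
        · subst h; simp at hdvd; omega
        · omega
      have hlt : d < m / d := by
        by_contra hle
        rw [Nat.not_lt] at hle
        have : m / d * d ≤ d * d := Nat.mul_le_mul_right d hle
        rw [Nat.mul_comm] at this
        omega
      simp only [hbig, Finset.mem_filter, hD, Nat.mem_divisors]
      refine ⟨⟨Nat.div_dvd_of_dvd hdvd, hm0⟩, ?_⟩
      calc m = d * (m / d) := hq.symm
        _ < (m / d) * (m / d) := (Nat.mul_lt_mul_right (by omega)).mpr hlt
    · intro d hd
      simp only [hbig, Finset.mem_filter, hD, Nat.mem_divisors] at hd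
      obtain ⟨⟨hdvd, hm0⟩, hsq⟩ := hd
      have hq : d * (m / d) = m := Nat.mul_div_cancel' hdvd
      have hd1 : 1 ≤ d := by
        rcases Nat.eq_zero_or_pos d with h | h
        · subst h; simp at hdvd; omega
        · omega
      have hq1 : 1 ≤ m / d := by
        rcases Nat.eq_zero_or_pos (m / d) with h | h
        · rw [h, Nat.mul_zero] at hq; omega
        · omega
      have hlt : m / d < d := by
        by_contra hle
        rw [Nat.not_lt] at hle
        have : d * d ≤ d * (m / d) := Nat.mul_le_mul_left d hle
        omega
      simp only [hstrict, Finset.mem_filter, hD, Nat.mem_divisors]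
      refine ⟨⟨Nat.div_dvd_of_dvd hdvd, hm0⟩, ?_⟩
      calc m / d * (m / d) < d * (m / d) := (Nat.mul_lt_mul_right (by omega)).mpr hlt
        _ = m := hq
    · intro d hd
      simp only [hstrict, Finset.mem_filter, hD, Nat.mem_divisors] at hd
      exact Nat.div_div_self hd.1.1 hd.1.2
    · intro d hd
      simp only [hbig, Finset.mem_filter, hD, Nat.mem_divisors] at hd
      exact Nat.div_div_self hd.1.1 hd.1.2
    · intro _ _
      rfl
  -- Step E: divisors split into small and big
  have stepE : ∑ e ∈ small, e + ∑ e ∈ big, e = ∑ e ∈ D, e := by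
    rw [← Finset.sum_filter_add_sum_filter_not D (fun e => e * e ≤ m) (fun e => e)]
    congr 1
    apply Finset.sum_congr _ (fun _ _ => rfl)
    simp only [hbig]
    apply Finset.filter_congr
    intro e _
    constructor
    · intro h
      exact Nat.not_le.mpr h
    · intro h
      exact Nat.not_le.mp h
  have hDsum : ∑ e ∈ D, e = ∑ i ∈ m.properDivisors, i + m :=
    Nat.sum_divisors_eq_sum_properDivisors_add_self
  show 1 + ∑ e ∈ Finset.Ico 2 (Nat.sqrt m + 1), (if e ∣ m then f e else 0) = ∑ i ∈ m.properDivisors, i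
  omega

-- break-when-all-found loop = componentwise first-match searches
lemma or_step (x : Option Int) (b : Bool) (i : Int) (s : Option Int) :
    x.or (if b then some i else s) = (if x.isNone && b then some i else x).or s := by
  cases x <;> cases b <;> simp

lemma loopA_eq_searches :
    ∀ (fuel : Nat) (i : Int) (p f a : Option Int), fuel ≤ i.toNat →
      loopA fuel i p f a
        = (p.or (searchB isPrimeA fuel i),
           f.or (searchB isPerfectA fuel i),
           a.or (searchB isArmstrongA fuel i)) := by
  intro fuel
  induction fuel with
  | zero => intro i p f a _; simp [loopA, searchB]
  | succ k ih =>
    intro i p f a hfuel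
    have hi : 1 ≤ i := by omega
    simp only [loopA, searchB, if_pos hi]
    rw [or_step p (isPrimeA i) i, or_step f (isPerfectA i) i, or_step a (isArmstrongA i) i]
    set p' := if p.isNone && isPrimeA i then some i else p with hp'
    set f' := if f.isNone && isPerfectA i then some i else f with hf'
    set a' := if a.isNone && isArmstrongA i then some i else a with ha'
    by_cases hall : p'.isSome && f'.isSome && a'.isSome
    · rw [if_pos hall]
      simp only [Bool.and_eq_true] at hall
      rw [Option.or_of_isSome hall.1.1, Option.or_of_isSome hall.1.2, Option.or_of_isSome hall.2]
    · rw [if_neg hall, ih (i-1) p' f' a' (by omega)]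

-- B's paired-divisor loop as a foldl over the d-range
lemma perfLoopB_eq_foldl (n : Int) (hn : 2 ≤ n) :
    ∀ (fuel : Nat) (d s : Int), 0 < d → (Int.sqrt n + 1 - d).toNat ≤ fuel →
      perfLoopB n fuel d s
        = (PySem.List.pyRange d (Int.sqrt n + 1) 1).foldl
            (fun s e => if PySem.Int.mod n e == 0 then
                          (if PySem.Int.floordiv n e != e
                           then s + e + PySem.Int.floordiv n e else s + e)
                        else s) s := by
  intro fuel
  induction fuel with
  | zero =>
    intro d s hd hfuel
    rw [PySem.List.pyRange_one_eq_nil (by omega)]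
    rfl
  | succ k ih =>
    intro d s hd hfuel
    by_cases hsq : d * d ≤ n
    · have hle : d ≤ Int.sqrt n := (sq_le_iff_le_sqrt (by omega) hd).mp hsq
      rw [PySem.List.pyRange_one_cons (by omega)]
      simp only [perfLoopB, if_pos hsq, List.foldl_cons]
      rw [ih (d+1) _ (by omega) (by omega)]
    · have : Int.sqrt n < d := by
        by_contra hle
        exact hsq ((sq_le_iff_le_sqrt (by omega) hd).mpr (by omega))
      rw [PySem.List.pyRange_one_eq_nil (by omega)]
      simp [perfLoopB, hsq]

lemma isPerfect_agree : ∀ j : Int, 1 ≤ j → isPerfectA j = isPerfectB j := by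
  intro j hj
  unfold isPerfectA isPerfectB
  by_cases h : j ≤ 1
  · simp [h]
  · rw [if_neg h, if_neg h]
    have hj2 : 2 ≤ j := by omega
    have hm2 : 2 ≤ j.toNat := by omega
    have hsq : Int.sqrt j = ((Nat.sqrt j.toNat : Nat) : Int) := rfl
    rw [perfLoopB_eq_foldl j hj2 j.toNat 2 1 (by omega)
        (by have := Nat.sqrt_le_self j.toNat; omega)]
    rw [sumA_eq j hj2]
    have hstep : (fun (s e : Int) => if PySem.Int.mod j e == 0 then (if PySem.Int.floordiv j e != e then s + e + PySem.Int.floordiv j e else s + e) else s)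
        = (fun (s e : Int) => s + (if PySem.Int.mod j e == 0 then e + (if PySem.Int.floordiv j e != e then PySem.Int.floordiv j e else 0) else 0)) := by
      funext s e
      split_ifs <;> ring
    rw [hstep, PySem.List.foldl_add, PySem.List.pyRange_one, List.map_map, sum_map_range]
    have hN : (Int.sqrt j + 1 - 2).toNat = (Nat.sqrt j.toNat + 1) - 2 := by omega
    have hcast : ∑ k ∈ Finset.range (Int.sqrt j + 1 - 2).toNat,
        ((fun (e : Int) => if PySem.Int.mod j e == 0 then e + (if PySem.Int.floordiv j e != e then PySem.Int.floordiv j e else 0) else 0) ∘ (fun (k : Nat) => 2 + (k : Int))) k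
        = ((∑ e ∈ Finset.Ico 2 (Nat.sqrt j.toNat + 1),
            (if e ∣ j.toNat then e + (if j.toNat / e ≠ e then j.toNat / e else 0) else 0) : ℕ) : ℤ) := by
      rw [Finset.sum_Ico_eq_sum_range, hN]
      rw [Nat.cast_sum]
      apply Finset.sum_congr rfl
      intro k _
      simp only [Function.comp]
      have he : ((2 + k : Nat) : Int) = 2 + (k : Int) := by push_cast; ring
      rw [← he, mod_beq_zero_eq_dvd j (2 + k) (by omega)]
      have hdiv : PySem.Int.floordiv j ((2 + k : Nat) : Int) = ((j.toNat / (2 + k) : Nat) : Int) := by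
        rw [PySem.Int.floordiv_eq_ediv_of_pos (by positivity), Int.natCast_div]
        conv_lhs => rw [show j = ((j.toNat : Nat) : Int) from by omega]
      have hbeq : (((j.toNat / (2 + k) : Nat) : Int) != ((2 + k : Nat) : Int))
          = decide (j.toNat / (2 + k) ≠ (2 + k)) := by
        rw [Bool.eq_iff_iff]
        simp only [bne_iff_ne, ne_eq, Nat.cast_inj, decide_eq_true_eq]
      by_cases hdvd : (2 + k) ∣ j.toNat
      · rw [if_pos (by simpa using hdvd), if_pos hdvd, hdiv, hbeq]
        simp only [decide_eq_true_eq]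
        by_cases hne : j.toNat / (2 + k) ≠ (2 + k)
        · rw [if_pos hne, if_pos hne]
          push_cast; ring
        · rw [if_neg hne, if_neg hne]
          push_cast; ring
      · rw [if_neg (by simpa using hdvd), if_neg hdvd]
        rfl
    rw [hcast]
    have hpair := paired_divisor_sum j.toNat hm2
    have hfin : (1 : ℤ) + ((∑ e ∈ Finset.Ico 2 (Nat.sqrt j.toNat + 1),
            (if e ∣ j.toNat then e + (if j.toNat / e ≠ e then j.toNat / e else 0) else 0) : ℕ) : ℤ)
        = ((∑ i ∈ (j.toNat).properDivisors, i : ℕ) : ℤ) := by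
      exact_mod_cast hpair
    rw [hfin]

-- ===== VERDICT (by name: the statement is the Claim_ definition above) =====
theorem find_special_numbers_spec : Claim_equal_find_special_numbers := by
  intro limit _
  unfold Spec_find_special_numbers find_special_numbers find_special_numbers_alt
  rw [loopA_eq_searches _ _ _ _ _ (le_refl _)]
  rw [searchB_congr _ _ isPrime_agree, searchB_congr _ _ isPerfect_agree,
      searchB_congr _ _ (fun j _ => rfl)]
  rfl
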